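-- pv_equiv track=rewrite | github.com/pypi-data/pypi-mirror-370 | packages/duosubs/duosubs-1.1.0-py3-none-any.whl/duosubs/core/merger.py | _get_sequence_list
-- ===== SOURCE A (Python) =====
-- import math
--
-- def _get_sequence_list(start: int, end: int) -> list[int]:
--     """
--     Generates a sequence list for filtering based on start and end indices.
--
--     Args:
--         start (int): Start index.
--         end (int): End index.
--
--     Returns:
--         list[int]: Sequence of indices for filtering.
--     """
--     sequence_to_filter = []
--     idx = start + math.ceil((end - start)/2) - 1
--     for i in range(end-start):
--         if i%2==0:
--             idx-=i
--         else:
--             idx+=i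
--         sequence_to_filter.append(idx)
--     return sequence_to_filter
-- ===== SOURCE B (Python) =====
-- import math
--
-- def _get_sequence_list(start: int, end: int) -> list[int]:
--     """Closed-form per-index version: no running accumulator."""
--     n = end - start
--     base = start + math.ceil(n / 2) - 1
--     return [base - i // 2 if i % 2 == 0 else base + (i + 1) // 2 for i in range(n)]
-- ===== Notes on version B (the rewrite author's own statement) =====
-- stated objective: simpler
-- what changed: Replaces the stateful loop (idx carried and alternately decremented/incremented by i) with a per-index closed form: element i is base - i//2 for even i and base + (i+1)//2 for odd i, emitted by a comprehension with no carried state.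
import Mathlib
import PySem

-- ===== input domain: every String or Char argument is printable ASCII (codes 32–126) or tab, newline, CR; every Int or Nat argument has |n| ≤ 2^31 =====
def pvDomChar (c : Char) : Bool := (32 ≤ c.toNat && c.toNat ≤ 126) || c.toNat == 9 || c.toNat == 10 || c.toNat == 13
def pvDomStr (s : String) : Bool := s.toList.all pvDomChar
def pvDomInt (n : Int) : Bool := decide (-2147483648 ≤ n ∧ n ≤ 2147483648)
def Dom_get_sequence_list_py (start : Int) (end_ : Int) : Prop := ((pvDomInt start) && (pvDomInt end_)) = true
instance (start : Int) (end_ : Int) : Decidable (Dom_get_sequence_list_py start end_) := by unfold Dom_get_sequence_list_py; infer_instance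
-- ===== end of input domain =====

-- B replaces A's running accumulator with a per-index closed form (same O(n) cost).


-- ===== PORT A =====
-- math.ceil((end-start)/2) is ported as the exact ceiling division ⌈(end_-start)/2⌉ =
-- (end_-start+1) // 2; on Dom (|args| ≤ 2^31) the float division by 2 is exact, so this is exact.
def get_sequence_list_py (start : Int) (end_ : Int) : List Int :=
  ((PySem.List.pyRange 0 (end_ - start) 1).foldl
    (fun (st : Int × List Int) i =>
      let idx := if PySem.Int.mod i 2 = 0 then st.1 - i else st.1 + i
      (idx, st.2 ++ [idx]))
    (start + PySem.Int.floordiv (end_ - start + 1) 2 - 1, [])).2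

-- ===== PORT B =====
def get_sequence_list_py_alt (start : Int) (end_ : Int) : List Int :=
  (PySem.List.pyRange 0 (end_ - start) 1).map (fun i =>
    if PySem.Int.mod i 2 = 0
    then start + PySem.Int.floordiv (end_ - start + 1) 2 - 1 - PySem.Int.floordiv i 2
    else start + PySem.Int.floordiv (end_ - start + 1) 2 - 1 + PySem.Int.floordiv (i + 1) 2)

-- ===== PRECONDITION & SPEC =====
def Spec_get_sequence_list_py (start : Int) (end_ : Int) (out : List Int) : Prop := out = get_sequence_list_py_alt start end_
instance (start : Int) (end_ : Int) (out : List Int) : Decidable (Spec_get_sequence_list_py start end_ out) := by unfold Spec_get_sequence_list_py; infer_instance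

-- ===== CLAIM (what is proved, stated in full; the proofs are below) =====
def Claim_equal_get_sequence_list_py : Prop := ∀ (start : Int) (end_ : Int), Dom_get_sequence_list_py start end_ → Spec_get_sequence_list_py start end_ (get_sequence_list_py start end_)

-- ===== LEMMAS AND PROOFS =====

-- the offset of element i relative to the initial idx value
def pvOff (i : Int) : Int :=
  if PySem.Int.mod i 2 = 0 then -(PySem.Int.floordiv i 2) else PySem.Int.floordiv (i + 1) 2

lemma pvOff_neg_one : pvOff (-1) = 0 := by decide

lemma pvOff_step (m : Int) (hm : 0 ≤ m) :
    (if PySem.Int.mod m 2 = 0 then pvOff (m - 1) - m else pvOff (m - 1) + m) = pvOff m := by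
  unfold pvOff
  simp only [PySem.Int.mod_eq_emod_of_pos (show (0:Int) < 2 by norm_num),
             PySem.Int.floordiv_eq_ediv_of_pos (show (0:Int) < 2 by norm_num)]
  split_ifs <;> omega

lemma pvLoop (base : Int) (m : Nat) :
    (PySem.List.pyRange 0 (m : Int) 1).foldl
      (fun (st : Int × List Int) i =>
        let idx := if PySem.Int.mod i 2 = 0 then st.1 - i else st.1 + i
        (idx, st.2 ++ [idx])) (base, [])
    = (base + pvOff ((m : Int) - 1),
       (PySem.List.pyRange 0 (m : Int) 1).map (fun i => base + pvOff i)) := by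
  induction m with
  | zero =>
      simp [PySem.List.pyRange_one_eq_nil (by norm_num : (0:Int) ≤ 0), pvOff_neg_one]
  | succ k ih =>
      have hcast : ((k + 1 : Nat) : Int) = (k : Int) + 1 := by push_cast; ring
      rw [hcast, PySem.List.pyRange_one_succ_right (by positivity), List.foldl_append,
          List.map_append, ih]
      simp only [List.foldl_cons, List.foldl_nil]
      have hstep := pvOff_step (k : Int) (by positivity)
      have h1 : (if PySem.Int.mod (k : Int) 2 = 0 then base + pvOff ((k:Int) - 1) - (k:Int)
              else base + pvOff ((k:Int) - 1) + (k:Int)) = base + pvOff (k:Int) := by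
        rw [← hstep]; split_ifs <;> ring
      rw [h1]
      simp [show (k:Int) + 1 - 1 = (k:Int) by ring]

-- ===== VERDICT (by name: the statement is the Claim_ definition above) =====
theorem get_sequence_list_py_spec : Claim_equal_get_sequence_list_py := by
  intro start end_ _
  unfold Spec_get_sequence_list_py get_sequence_list_py get_sequence_list_py_alt
  by_cases h : end_ - start ≤ 0
  · simp [PySem.List.pyRange_one_eq_nil h]
  · have hm : ((end_ - start).toNat : Int) = end_ - start := by omega
    rw [← hm, pvLoop]
    apply List.map_congr_left
    intro i _
    unfold pvOff
    split_ifs <;> ring
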